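-- pv_equiv track=rewrite | github.com/rubakas/agent-notes | lib/generate.py | strip_memory_section
-- ===== SOURCE A (Python) =====
-- def strip_memory_section(content):
--     """Strip ## Memory section from content for OpenCode format."""
--     lines = content.split('\n')
--     result_lines = []
--     in_memory_section = False
--
--     for line in lines:
--         if line.startswith('## Memory'):
--             in_memory_section = True
--             continue
--         elif line.startswith('## ') and in_memory_section:
--             # New section after Memory, include this line and continue
--             in_memory_section = False
--             result_lines.append(line)
--         elif not in_memory_section:
--             result_lines.append(line)
--
--     # Remove trailing empty lines
--     while result_lines and result_lines[-1].strip() == '':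
--         result_lines.pop()
--
--     return '\n'.join(result_lines)
-- ===== SOURCE B (Python) =====
-- def _is_memory_group(g):
--     return bool(g) and g[0].startswith('## Memory')
--
--
-- def strip_memory_section(content):
--     """Strip ## Memory section from content for OpenCode format."""
--     lines = content.split('\n')
--     # Partition lines into sections: a new group starts at every '## ' header;
--     # the lines before the first header form the preamble group.
--     groups = []
--     cur = []
--     for line in lines:
--         if line.startswith('## '):
--             groups.append(cur)
--             cur = [line]
--         else:
--             cur.append(line)
--     groups.append(cur)
--     # Keep every group except the Memory sections.
--     result = []
--     for g in groups:
--         if not _is_memory_group(g):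
--             result.extend(g)
--     # Remove trailing empty lines
--     while result and result[-1].strip() == '':
--         result.pop()
--     return '\n'.join(result)
-- ===== Notes on version B (the rewrite author's own statement) =====
-- stated objective: alternative
-- what changed: B partitions the lines into header-delimited section groups, filters out the groups whose header starts with '## Memory', and concatenates the rest, instead of A's single scan with an in_memory_section boolean flag.
import Mathlib
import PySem

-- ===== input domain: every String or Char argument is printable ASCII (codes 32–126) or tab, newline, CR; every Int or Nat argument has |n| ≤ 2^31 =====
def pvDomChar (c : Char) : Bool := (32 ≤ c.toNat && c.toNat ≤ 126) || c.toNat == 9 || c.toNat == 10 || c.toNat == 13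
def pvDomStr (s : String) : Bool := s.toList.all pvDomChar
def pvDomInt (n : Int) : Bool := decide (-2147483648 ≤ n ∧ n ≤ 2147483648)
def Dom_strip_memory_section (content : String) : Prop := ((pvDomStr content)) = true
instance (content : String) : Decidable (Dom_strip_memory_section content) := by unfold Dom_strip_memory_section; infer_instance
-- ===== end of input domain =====

-- B partitions the lines into header-delimited section groups and drops the Memory groups,
-- instead of A's single scan with an in_memory_section flag; same cost (objective: alternative).

-- shared trailing-blank trim: both Pythons carry the identical
-- "while result and result[-1].strip() == '': result.pop()" loop
def pvPopRev : List String → List String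
  | [] => []
  | l :: t => if PySem.Str.strip l == "" then pvPopRev t else l :: t

def pvTrimTrailing (xs : List String) : List String := (pvPopRev xs.reverse).reverse

-- ===== PORT A =====
-- state: (result_lines, in_memory_section)
def pvAStep (st : List String × Bool) (line : String) : List String × Bool :=
  if PySem.Str.startswith line "## Memory" then (st.1, true)
  else if PySem.Str.startswith line "## " && st.2 then (st.1 ++ [line], false)
  else if !st.2 then (st.1 ++ [line], st.2)
  else st

def strip_memory_section (content : String) : String :=
  let lines := (PySem.Str.split? content "\n").getD []
  let st := lines.foldl pvAStep ([], false)
  PySem.Str.join "\n" (pvTrimTrailing st.1)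

-- ===== PORT B =====
-- _is_memory_group(g)
def pvIsMemGroup : List String → Bool
  | [] => false
  | h :: _ => PySem.Str.startswith h "## Memory"

-- grouping loop, state: (groups, cur)
def pvBStep (st : List (List String) × List String) (line : String) :
    List (List String) × List String :=
  if PySem.Str.startswith line "## " then (st.1 ++ [st.2], [line])
  else (st.1, st.2 ++ [line])

-- result-collection loop over the groups
def pvCollect (acc : List String) (g : List String) : List String :=
  if pvIsMemGroup g then acc else acc ++ g

def strip_memory_section_alt (content : String) : String :=
  let lines := (PySem.Str.split? content "\n").getD []
  let st := lines.foldl pvBStep ([], [])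
  let groups := st.1 ++ [st.2]
  let result := groups.foldl pvCollect []
  PySem.Str.join "\n" (pvTrimTrailing result)

-- ===== PRECONDITION & SPEC =====
def Spec_strip_memory_section (content : String) (out : String) : Prop := out = strip_memory_section_alt content
instance (content : String) (out : String) : Decidable (Spec_strip_memory_section content out) := by unfold Spec_strip_memory_section; infer_instance

-- ===== CLAIM (what is proved, stated in full; the proofs are below) =====
def Claim_equal_strip_memory_section : Prop := ∀ (content : String), Dom_strip_memory_section content → Spec_strip_memory_section content (strip_memory_section content)

-- ===== LEMMAS AND PROOFS =====

lemma pvIsMem_nil : pvIsMemGroup [] = false := rfl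

lemma pvIsMem_cons (h : String) (t : List String) :
    pvIsMemGroup (h :: t) = PySem.Str.startswith h "## Memory" := rfl

lemma pvCollect_eq (acc g : List String) :
    pvCollect acc g = if pvIsMemGroup g then acc else acc ++ g := rfl

lemma pvCollect_append (d : List (List String)) (g : List String) :
    (d ++ [g]).foldl pvCollect [] =
      d.foldl pvCollect [] ++ (if pvIsMemGroup g then [] else g) := by
  rw [List.foldl_append, List.foldl_cons, List.foldl_nil, pvCollect_eq]
  split_ifs <;> simp

-- a line starting with "## Memory" also starts with "## "
lemma pvMemory_startswith (l : String) (h : PySem.Str.startswith l "## Memory" = true) :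
    PySem.Str.startswith l "## " = true := by
  simp only [PySem.Str.startswith] at *
  rw [PySem.Chars.startswith_iff] at *
  exact List.IsPrefix.trans (by decide) h

-- core invariant: A's fold carries the filtered concatenation of B's closed groups
lemma pvLoop_eq (lines : List String) (d : List (List String)) (cur : List String) :
    (lines.foldl pvAStep
        (d.foldl pvCollect [] ++ (if pvIsMemGroup cur then [] else cur), pvIsMemGroup cur)).1
      = (((lines.foldl pvBStep (d, cur)).1 ++ [(lines.foldl pvBStep (d, cur)).2]).foldl
          pvCollect []) := by
  induction lines generalizing d cur with
  | nil => rw [pvCollect_append]; simp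
  | cons l ls ih =>
    rw [List.foldl_cons, List.foldl_cons]
    cases hm : PySem.Str.startswith l "## Memory" with
    | true =>
      have h2 : PySem.Str.startswith l "## " = true := pvMemory_startswith l hm
      have hB : pvBStep (d, cur) l = (d ++ [cur], [l]) := by
        unfold pvBStep; rw [h2]; simp
      have hA : pvAStep
          (d.foldl pvCollect [] ++ (if pvIsMemGroup cur then [] else cur), pvIsMemGroup cur) l
          = ((d ++ [cur]).foldl pvCollect [] ++ (if pvIsMemGroup [l] then [] else [l]),
             pvIsMemGroup [l]) := by
        unfold pvAStep
        rw [hm, pvCollect_append, pvIsMem_cons, hm]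
        simp
      rw [hA, hB]; exact ih (d ++ [cur]) [l]
    | false =>
      cases h2 : PySem.Str.startswith l "## " with
      | true =>
        have hB : pvBStep (d, cur) l = (d ++ [cur], [l]) := by
          unfold pvBStep; rw [h2]; simp
        have hA : pvAStep
            (d.foldl pvCollect [] ++ (if pvIsMemGroup cur then [] else cur), pvIsMemGroup cur) l
            = ((d ++ [cur]).foldl pvCollect [] ++ (if pvIsMemGroup [l] then [] else [l]),
               pvIsMemGroup [l]) := by
          unfold pvAStep
          rw [hm, pvCollect_append, pvIsMem_cons, hm, h2]
          cases pvIsMemGroup cur <;> simp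
        rw [hA, hB]; exact ih (d ++ [cur]) [l]
      | false =>
        have hB : pvBStep (d, cur) l = (d, cur ++ [l]) := by
          unfold pvBStep; rw [h2]; simp
        have hclass : pvIsMemGroup (cur ++ [l]) = pvIsMemGroup cur := by
          cases cur with
          | nil =>
            rw [List.nil_append, pvIsMem_cons, pvIsMem_nil]
            cases hcon : PySem.Str.startswith l "## Memory" with
            | true => rw [pvMemory_startswith l hcon] at h2; exact h2
            | false => rfl
          | cons a t => rw [List.cons_append, pvIsMem_cons, pvIsMem_cons]
        have hA : pvAStep
            (d.foldl pvCollect [] ++ (if pvIsMemGroup cur then [] else cur), pvIsMemGroup cur) l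
            = (d.foldl pvCollect [] ++ (if pvIsMemGroup (cur ++ [l]) then [] else cur ++ [l]),
               pvIsMemGroup (cur ++ [l])) := by
          unfold pvAStep
          rw [hm, h2, hclass]
          cases pvIsMemGroup cur <;> simp
        rw [hA, hB]; exact ih d (cur ++ [l])

-- ===== VERDICT (by name: the statement is the Claim_ definition above) =====
theorem strip_memory_section_spec : Claim_equal_strip_memory_section := by
  intro content _
  show strip_memory_section content = strip_memory_section_alt content
  have h := pvLoop_eq ((PySem.Str.split? content "\n").getD []) [] []
  simp only [pvIsMem_nil, List.foldl_nil, Bool.false_eq_true, if_false, List.append_nil] at h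
  show PySem.Str.join "\n" (pvTrimTrailing
      (List.foldl pvAStep ([], false) ((PySem.Str.split? content "\n").getD [])).1)
    = PySem.Str.join "\n" (pvTrimTrailing _)
  rw [h]
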